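-- pv_equiv track=rewrite | github.com/nkhoit/spire-agent | spire_agent/mcp_server.py | _resolve_card
-- ===== SOURCE A (Python) =====
-- def _resolve_card(hand: list[dict], card_name: str) -> tuple[int, dict] | None:
--     """Find a card in hand by name (case-insensitive, partial match)."""
--     lower = card_name.lower()
--     for i, card in enumerate(hand):
--         if card.get("name", "").lower() == lower:
--             return i, card
--     for i, card in enumerate(hand):
--         if lower in card.get("name", "").lower():
--             return i, card
--     return None
-- ===== SOURCE B (Python) =====
-- def _resolve_card(hand: list[dict], card_name: str) -> tuple[int, dict] | None:
--     """Find a card in hand by name (case-insensitive, partial match)."""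
--     lower = card_name.lower()
--     partial = None
--     for i, card in enumerate(hand):
--         nm = card.get("name", "").lower()
--         if nm == lower:
--             return i, card
--         if partial is None and lower in nm:
--             partial = (i, card)
--     return partial
-- ===== Notes on version B (the rewrite author's own statement) =====
-- stated objective: alternative
-- what changed: Replaces A's two full passes (exact pass, then partial pass) by a single pass that returns on an exact match and records the first partial match in an accumulator.
import Mathlib
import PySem

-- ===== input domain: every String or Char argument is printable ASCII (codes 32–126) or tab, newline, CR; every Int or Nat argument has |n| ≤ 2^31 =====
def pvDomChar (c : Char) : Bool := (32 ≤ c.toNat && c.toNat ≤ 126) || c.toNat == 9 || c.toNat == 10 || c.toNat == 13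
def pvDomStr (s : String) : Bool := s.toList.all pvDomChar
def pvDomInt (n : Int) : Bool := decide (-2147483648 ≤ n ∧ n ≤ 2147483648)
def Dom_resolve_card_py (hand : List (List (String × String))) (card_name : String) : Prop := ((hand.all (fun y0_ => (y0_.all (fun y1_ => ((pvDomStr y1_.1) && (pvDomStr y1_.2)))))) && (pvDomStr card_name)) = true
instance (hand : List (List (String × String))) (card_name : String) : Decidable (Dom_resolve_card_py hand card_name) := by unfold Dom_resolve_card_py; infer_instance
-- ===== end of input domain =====

-- B replaces A's two full passes by ONE pass that returns on an exact match and
-- records the first partial match in an accumulator (objective: alternative single-pass decomposition; same O(n)).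

-- ===== PORT A =====
-- card.get("name", ""): first-match lookup in the association list (Python dict keys are unique)
def pvDictGet (c : List (String × String)) (k : String) (dflt : String) : String :=
  ((c.find? (fun p => p.1 == k)).map Prod.snd).getD dflt

-- first loop of A: return (i, card) on the first exact (case-insensitive) name match
def pvAExact (lower : String) : List (List (String × String)) → Int → Option (Int × (List (String × String)))
  | [], _ => none
  | c :: rest, i =>
    if PySem.Str.lower (pvDictGet c "name" "") = lower then some (i, c)
    else pvAExact lower rest (i + 1)

-- second loop of A: return (i, card) on the first partial (substring) match
def pvAPartial (lower : String) : List (List (String × String)) → Int → Option (Int × (List (String × String)))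
  | [], _ => none
  | c :: rest, i =>
    if PySem.Str.isIn lower (PySem.Str.lower (pvDictGet c "name" "")) then some (i, c)
    else pvAPartial lower rest (i + 1)

def resolve_card_py (hand : List (List (String × String))) (card_name : String) : Option (Int × (List (String × String))) :=
  let lower := PySem.Str.lower card_name
  match pvAExact lower hand 0 with
  | some r => some r
  | none =>
    match pvAPartial lower hand 0 with
    | some r => some r
    | none => none

-- ===== PORT B =====
-- single pass: return immediately on exact match, carry the first partial match in `partial_`
def pvBLoop (lower : String) : List (List (String × String)) → Int →
    Option (Int × (List (String × String))) → Option (Int × (List (String × String)))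
  | [], _, partial_ => partial_
  | c :: rest, i, partial_ =>
    let nm := PySem.Str.lower (pvDictGet c "name" "")
    if nm = lower then some (i, c)
    else pvBLoop lower rest (i + 1)
      (if partial_.isNone && PySem.Str.isIn lower nm then some (i, c) else partial_)

def resolve_card_py_alt (hand : List (List (String × String))) (card_name : String) : Option (Int × (List (String × String))) :=
  pvBLoop (PySem.Str.lower card_name) hand 0 none

-- ===== PRECONDITION & SPEC =====
def Spec_resolve_card_py (hand : List (List (String × String))) (card_name : String) (out : Option (Int × (List (String × String)))) : Prop := out = resolve_card_py_alt hand card_name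
instance (hand : List (List (String × String))) (card_name : String) (out : Option (Int × (List (String × String)))) : Decidable (Spec_resolve_card_py hand card_name out) := by unfold Spec_resolve_card_py; infer_instance

-- ===== CLAIM (what is proved, stated in full; the proofs are below) =====
def Claim_equal_resolve_card_py : Prop := ∀ (hand : List (List (String × String))) (card_name : String), Dom_resolve_card_py hand card_name → Spec_resolve_card_py hand card_name (resolve_card_py hand card_name)

-- ===== LEMMAS AND PROOFS =====

-- Loop invariant: the one-pass loop equals "exact match in the suffix, else the
-- recorded partial, else the first partial in the suffix".
theorem pvBLoop_eq (lower : String) (xs : List (List (String × String))) :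
    ∀ (i : Int) (p : Option (Int × (List (String × String)))),
      pvBLoop lower xs i p =
        match pvAExact lower xs i with
        | some r => some r
        | none => match p with
          | some b => some b
          | none => pvAPartial lower xs i := by
  induction xs with
  | nil => intro i p; cases p <;> simp [pvBLoop, pvAExact, pvAPartial]
  | cons c rest ih =>
    intro i p
    by_cases hex : PySem.Str.lower (pvDictGet c "name" "") = lower
    · simp [pvBLoop, pvAExact, hex]
    · cases p with
      | some b =>
        simp [pvBLoop, pvAExact, hex, ih]
      | none =>
        by_cases hpart : PySem.Str.isIn lower (PySem.Str.lower (pvDictGet c "name" ""))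
        · simp [pvBLoop, pvAExact, pvAPartial, hex, ih]
          split <;> simp_all
        · simp [pvBLoop, pvAExact, pvAPartial, hex, ih]
          split <;> simp_all

-- ===== VERDICT (by name: the statement is the Claim_ definition above) =====
theorem resolve_card_py_spec : Claim_equal_resolve_card_py := by
  intro hand card_name _
  unfold Spec_resolve_card_py resolve_card_py resolve_card_py_alt
  rw [pvBLoop_eq]
  cases he : pvAExact (PySem.Str.lower card_name) hand 0 <;>
    cases hp : pvAPartial (PySem.Str.lower card_name) hand 0 <;> simp [he, hp]
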